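-- pv_equiv track=rewrite | github.com/idodo01/2024.01.21_Programmers_Study | list_count_alphabet_ASCII.py | solution
-- ===== SOURCE A (Python) =====
-- def solution(my_string):
--     answer = [0]*52
--     count = 0
--
--     for i in my_string :
--
--         # 아스키 코드 65 ~ 90 => 'A'~'Z'
--         for j in range(0,26) :
--             if(i==chr(j+65)) :
--                 answer[j]+=1
--         # 아스키 코드 97 ~ 122 => 'a'~'z'
--         for j in range(26,52) :
--             if(i==chr(j+71)) :
--                 answer[j]+=1
--
--
--     return answer
-- ===== SOURCE B (Python) =====
-- def solution(my_string):
--     freq = {}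
--     for ch in my_string:
--         freq[ch] = freq.get(ch, 0) + 1
--     return [freq.get(chr(j + 65 if j < 26 else j + 71), 0) for j in range(52)]
-- ===== Notes on version B (the rewrite author's own statement) =====
-- stated objective: faster
-- what changed: A scans all 52 alphabet slots for every character of the string; B makes one pass over the string building a frequency dict, then reads the 52 slots once from the dict.
import Mathlib
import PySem

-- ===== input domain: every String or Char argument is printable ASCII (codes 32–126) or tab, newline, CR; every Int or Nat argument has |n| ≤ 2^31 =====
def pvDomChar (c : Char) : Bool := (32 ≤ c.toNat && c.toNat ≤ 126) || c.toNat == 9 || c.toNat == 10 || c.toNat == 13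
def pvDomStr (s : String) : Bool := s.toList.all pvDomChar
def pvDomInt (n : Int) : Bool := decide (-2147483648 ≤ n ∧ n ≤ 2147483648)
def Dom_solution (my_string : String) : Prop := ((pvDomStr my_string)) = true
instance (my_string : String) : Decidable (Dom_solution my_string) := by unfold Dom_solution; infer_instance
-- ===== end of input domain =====

-- B replaces A's per-character scan of all 52 alphabet slots by one frequency dict built in
-- a single pass over the string, then one read of each of the 52 slots (objective: faster, constant factor).

-- ===== PORT A =====
-- chr(j+65)/chr(j+71) is ported as Char.ofNat (…).toNat: exact here since the codes are 65..122.
def solution (my_string : String) : List Int :=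
  my_string.toList.foldl
    (fun answer i =>
      let answer :=
        (PySem.List.pyRange 0 26 1).foldl
          (fun ans j =>
            if i = Char.ofNat (j + 65).toNat then
              PySem.List.pySetD ans j (PySem.List.pyGetD ans j 0 + 1)
            else ans)
          answer
      (PySem.List.pyRange 26 52 1).foldl
        (fun ans j =>
          if i = Char.ofNat (j + 71).toNat then
            PySem.List.pySetD ans j (PySem.List.pyGetD ans j 0 + 1)
          else ans)
        answer)
    (List.replicate 52 (0 : Int))

-- ===== PORT B =====
def solution_alt (my_string : String) : List Int :=
  let freq := my_string.toList.foldl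
    (fun d ch => d.insert ch (d.getD ch 0 + 1)) (PySem.Dict.empty : PySem.Dict Char Int)
  (PySem.List.pyRange 0 52 1).map
    (fun j => freq.getD (Char.ofNat (if j < 26 then j + 65 else j + 71).toNat) 0)

-- ===== PRECONDITION & SPEC =====
def Spec_solution (my_string : String) (out : List Int) : Prop := out = solution_alt my_string
instance (my_string : String) (out : List Int) : Decidable (Spec_solution my_string out) := by unfold Spec_solution; infer_instance

-- ===== CLAIM (what is proved, stated in full; the proofs are below) =====
def Claim_equal_solution : Prop := ∀ (my_string : String), Dom_solution my_string → Spec_solution my_string (solution my_string)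

-- ===== LEMMAS AND PROOFS =====

theorem solution_len_fold (P : Int → Prop) [DecidablePred P] (r : List Int) (s : List Int) :
    (r.foldl (fun ans j => if P j then PySem.List.pySetD ans j (PySem.List.pyGetD ans j 0 + 1) else ans) s).length
      = s.length := by
  induction r generalizing s with
  | nil => rfl
  | cons a r ih =>
      simp only [List.foldl_cons]
      rw [ih]
      split <;> simp [PySem.List.length_pySetD]

theorem solution_range_nil (a b : Int) (h : b ≤ a) : PySem.List.pyRange a b = [] := by
  rw [PySem.List.pyRange_one]
  have : (b - a).toNat = 0 := by omega
  rw [this]; rfl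

theorem solution_ite_congr {C1 C2 : Prop} [Decidable C1] [Decidable C2] (h : C1 ↔ C2) :
    (if C1 then (1 : Int) else 0) = if C2 then 1 else 0 := by
  by_cases hc : C2
  · rw [if_pos hc, if_pos (h.mpr hc)]
  · rw [if_neg hc, if_neg (fun hx => hc (h.mp hx))]

theorem solution_fold_get (P : Int → Prop) [DecidablePred P] (a b : Int) (ha : 0 ≤ a) (s : List Int)
    (k : Nat) (hk : k < s.length) :
    ((PySem.List.pyRange a b).foldl
        (fun ans j => if P j then PySem.List.pySetD ans j (PySem.List.pyGetD ans j 0 + 1) else ans) s)[k]'(by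
          rw [solution_len_fold]; exact hk)
      = s[k] + (if a ≤ (k : Int) ∧ (k : Int) < b ∧ P k then 1 else 0) := by
  generalize hfuel : (b - a).toNat = n
  induction n generalizing a s with
  | zero =>
      rw [solution_range_nil a b (by omega)]
      simp only [List.foldl_nil]
      have h2 : ¬ (a ≤ (k:Int) ∧ (k:Int) < b ∧ P k) := by rintro ⟨u, v, _⟩; omega
      rw [if_neg h2]; ring
  | succ n ih =>
      have hab : a < b := by omega
      rw [PySem.List.pyRange_one_cons hab]
      simp only [List.foldl_cons]
      have hlen : (if P a then PySem.List.pySetD s a (PySem.List.pyGetD s a 0 + 1) else s).length = s.length := by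
        split <;> simp [PySem.List.length_pySetD]
      have hstep := ih (a + 1) (by omega)
        (if P a then PySem.List.pySetD s a (PySem.List.pyGetD s a 0 + 1) else s)
        (by rw [hlen]; exact hk) (by omega)
      by_cases hpa : P a
      · simp only [if_pos hpa] at hstep ⊢
        rw [hstep]
        simp only [PySem.List.pySetD_of_nonneg _ _ ha]
        rcases Nat.lt_or_ge k a.toNat with h | h
        · rw [List.getElem_set_ne (by omega)]
          congr 1
          refine solution_ite_congr ⟨fun ⟨u, v, w⟩ => absurd u (by omega), fun ⟨u, v, w⟩ => absurd u (by omega)⟩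
        · by_cases hka : (k : Int) = a
          · have hak : a.toNat = k := by omega
            simp only [hak, List.getElem_set_self]
            rw [PySem.List.pyGetD_of_nonneg _ _ ha, hak, List.getD_eq_getElem s 0 hk]
            have hC1 : ¬ (a + 1 ≤ (k:Int) ∧ (k:Int) < b ∧ P k) := by
              rintro ⟨u, _, _⟩; omega
            have hC2 : a ≤ (k:Int) ∧ (k:Int) < b ∧ P k := ⟨by omega, by omega, by rw [hka]; exact hpa⟩
            rw [if_neg hC1, if_pos hC2]; ring
          · rw [List.getElem_set_ne (by omega)]
            congr 1
            refine solution_ite_congr ⟨fun ⟨u, v, w⟩ => ⟨by omega, v, w⟩, fun ⟨u, v, w⟩ => ⟨by omega, v, w⟩⟩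
      · simp only [if_neg hpa] at hstep ⊢
        rw [hstep]
        congr 1
        refine solution_ite_congr ⟨fun ⟨u, v, w⟩ => ⟨by omega, v, w⟩, fun ⟨u, v, w⟩ => ⟨?_, v, w⟩⟩
        by_cases hka : (k : Int) = a
        · exact absurd (hka ▸ w) hpa
        · omega

-- the letter stored at slot k (k < 52)
def solLetter (k : Nat) : Char := Char.ofNat (if k < 26 then k + 65 else k + 71)

-- one character of A's outer loop increments exactly slot k with letter = i
theorem solution_step_get (i : Char) (s : List Int) (hs : s.length = 52) (k : Nat) (hk : k < 52) :
    ((PySem.List.pyRange 26 52 1).foldl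
        (fun ans j => if i = Char.ofNat (j + 71).toNat then PySem.List.pySetD ans j (PySem.List.pyGetD ans j 0 + 1) else ans)
        ((PySem.List.pyRange 0 26 1).foldl
          (fun ans j => if i = Char.ofNat (j + 65).toNat then PySem.List.pySetD ans j (PySem.List.pyGetD ans j 0 + 1) else ans)
          s))[k]'(by rw [solution_len_fold, solution_len_fold, hs]; exact hk)
      = s[k]'(by omega) + (if i = solLetter k then 1 else 0) := by
  have h1 := solution_fold_get (fun j => i = Char.ofNat (j + 65).toNat) 0 26 (by omega) s k (by omega)
  have h2 := solution_fold_get (fun j => i = Char.ofNat (j + 71).toNat) 26 52 (by omega)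
    ((PySem.List.pyRange 0 26 1).foldl
      (fun ans j => if i = Char.ofNat (j + 65).toNat then PySem.List.pySetD ans j (PySem.List.pyGetD ans j 0 + 1) else ans) s)
    k (by rw [solution_len_fold, hs]; exact hk)
  rw [h2, h1]
  by_cases hlt : k < 26
  · have e1 : ((0:Int) ≤ (k:Int) ∧ (k:Int) < 26 ∧ i = Char.ofNat ((k:Int) + 65).toNat) ↔ i = solLetter k := by
      unfold solLetter
      have : ((k:Int) + 65).toNat = k + 65 := by omega
      simp [this, hlt]
    have e2 : ¬ ((26:Int) ≤ (k:Int) ∧ (k:Int) < 52 ∧ i = Char.ofNat ((k:Int) + 71).toNat) := by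
      rintro ⟨u, _, _⟩; omega
    rw [if_neg e2]
    simp only [e1]
    omega
  · have e1 : ¬ ((0:Int) ≤ (k:Int) ∧ (k:Int) < 26 ∧ i = Char.ofNat ((k:Int) + 65).toNat) := by
      rintro ⟨_, u, _⟩; omega
    have e2 : ((26:Int) ≤ (k:Int) ∧ (k:Int) < 52 ∧ i = Char.ofNat ((k:Int) + 71).toNat) ↔ i = solLetter k := by
      unfold solLetter
      have : ((k:Int) + 71).toNat = k + 71 := by omega
      simp [this, hlt]
      constructor
      · rintro ⟨_, _, w⟩; exact w
      · intro w; exact ⟨by omega, by omega, w⟩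
    rw [if_neg e1]
    simp only [e2]
    omega

def solStep (i : Char) (answer : List Int) : List Int :=
  (PySem.List.pyRange 26 52 1).foldl
    (fun ans j => if i = Char.ofNat (j + 71).toNat then PySem.List.pySetD ans j (PySem.List.pyGetD ans j 0 + 1) else ans)
    ((PySem.List.pyRange 0 26 1).foldl
      (fun ans j => if i = Char.ofNat (j + 65).toNat then PySem.List.pySetD ans j (PySem.List.pyGetD ans j 0 + 1) else ans)
      answer)

theorem solStep_len (i : Char) (s : List Int) : (solStep i s).length = s.length := by
  unfold solStep; rw [solution_len_fold, solution_len_fold]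

theorem solution_foldl_len (cs : List Char) (s : List Int) :
    (cs.foldl (fun answer i => solStep i answer) s).length = s.length := by
  induction cs generalizing s with
  | nil => rfl
  | cons c cs ih =>
      simp only [List.foldl_cons]
      rw [ih, solStep_len]

theorem solution_outer (cs : List Char) (s : List Int) (hs : s.length = 52) (k : Nat) (hk : k < 52) :
    (cs.foldl (fun answer i => solStep i answer) s)[k]'(by rw [solution_foldl_len, hs]; exact hk)
      = s[k]'(by omega) + (cs.count (solLetter k) : Int) := by
  induction cs generalizing s with
  | nil => simp
  | cons c cs ih =>
      simp only [List.foldl_cons]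
      rw [ih (solStep c s) (by rw [solStep_len, hs])]
      have hstep := solution_step_get c s hs k hk
      unfold solStep
      rw [hstep]
      rw [List.count_cons]
      by_cases hc : c = solLetter k
      · simp [hc]; ring
      · have hbc : ¬ (solLetter k == c) = true := by
          simp only [beq_iff_eq]
          exact fun h => hc h.symm
        simp [hc]

theorem solution_eq_count (my_string : String) :
    solution my_string = (List.range 52).map (fun k => (my_string.toList.count (solLetter k) : Int)) := by
  have hdef : solution my_string
      = my_string.toList.foldl (fun answer i => solStep i answer) (List.replicate 52 (0 : Int)) := rfl
  rw [hdef]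
  apply List.ext_getElem
  · rw [solution_foldl_len]; simp
  · intro k h1 h2
    have hk : k < 52 := by rw [solution_foldl_len] at h1; simpa using h1
    have := solution_outer my_string.toList (List.replicate 52 (0:Int)) (by simp) k hk
    rw [List.getElem_map, List.getElem_range]
    rw [this, List.getElem_replicate]
    ring

theorem solution_alt_eq_count (my_string : String) :
    solution_alt my_string = (List.range 52).map (fun k => (my_string.toList.count (solLetter k) : Int)) := by
  unfold solution_alt
  simp only [PySem.List.pyRange_one]
  rw [show ((52:Int) - 0).toNat = 52 from rfl]
  rw [List.map_map]
  apply List.map_congr_left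
  intro k hk
  rw [List.mem_range] at hk
  simp only [Function.comp, zero_add]
  rw [PySem.Dict.getD_foldl_insert_add_one]
  simp only [PySem.Dict.getD_empty, zero_add]
  congr 1
  unfold solLetter
  by_cases h : k < 26
  · rw [if_pos (show (k:Int) < 26 by omega), if_pos h]
    rw [show ((k:Int) + 65).toNat = k + 65 from by omega]
  · rw [if_neg (show ¬ ((k:Int) < 26) by omega), if_neg h]
    rw [show ((k:Int) + 71).toNat = k + 71 from by omega]

-- ===== VERDICT (by name: the statement is the Claim_ definition above) =====
theorem solution_spec : Claim_equal_solution := by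
  intro my_string _
  unfold Spec_solution
  rw [solution_eq_count, solution_alt_eq_count]
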